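-- pv_equiv track=rewrite | github.com/poojancopart/auction-simulator | app.py | _under_1000
-- ===== SOURCE A (Python) =====
-- _ONES = [
--     '', 'one', 'two', 'three', 'four', 'five', 'six', 'seven', 'eight', 'nine',
--     'ten', 'eleven', 'twelve', 'thirteen', 'fourteen', 'fifteen', 'sixteen',
--     'seventeen', 'eighteen', 'nineteen',
-- ]
--
-- _TENS = ['', '', 'twenty', 'thirty', 'forty', 'fifty', 'sixty', 'seventy', 'eighty', 'ninety']
--
-- def _under_1000(n: int) -> str:
--     if n == 0:
--         return ''
--     if n < 20:
--         return _ONES[n]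
--     if n < 100:
--         rest = _ONES[n % 10]
--         return _TENS[n // 10] + (' ' + rest if rest else '')
--     rest = _under_1000(n % 100)
--     return _ONES[n // 100] + ' hundred' + (' ' + rest if rest else '')
-- ===== SOURCE B (Python) =====
-- _ONES = [
--     '', 'one', 'two', 'three', 'four', 'five', 'six', 'seven', 'eight', 'nine',
--     'ten', 'eleven', 'twelve', 'thirteen', 'fourteen', 'fifteen', 'sixteen',
--     'seventeen', 'eighteen', 'nineteen',
-- ]
--
-- _TENS = ['', '', 'twenty', 'thirty', 'forty', 'fifty', 'sixty', 'seventy', 'eighty', 'ninety']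
--
-- def _under_1000(n: int) -> str:
--     if n == 0:
--         return ''
--     if n < 20:
--         return _ONES[n]
--     parts = []
--     if n >= 100:
--         parts.append(_ONES[n // 100] + ' hundred')
--         n = n % 100
--     if n >= 20:
--         parts.append(_TENS[n // 10])
--         n = n % 10
--     if n:
--         parts.append(_ONES[n])
--     return ' '.join(parts)
-- ===== Notes on version B (the rewrite author's own statement) =====
-- stated objective: alternative
-- what changed: Replaces A's self-recursion with one flat pass that collects the hundred/tens/ones word tokens in a list and joins them with spaces; no recursion and no conditional-space concatenation.
-- outside the precondition, e.g. on _under_1000(-21): A raises IndexError, B raises IndexError; on _under_1000(2000): A raises IndexError, B raises IndexError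
import Mathlib
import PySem

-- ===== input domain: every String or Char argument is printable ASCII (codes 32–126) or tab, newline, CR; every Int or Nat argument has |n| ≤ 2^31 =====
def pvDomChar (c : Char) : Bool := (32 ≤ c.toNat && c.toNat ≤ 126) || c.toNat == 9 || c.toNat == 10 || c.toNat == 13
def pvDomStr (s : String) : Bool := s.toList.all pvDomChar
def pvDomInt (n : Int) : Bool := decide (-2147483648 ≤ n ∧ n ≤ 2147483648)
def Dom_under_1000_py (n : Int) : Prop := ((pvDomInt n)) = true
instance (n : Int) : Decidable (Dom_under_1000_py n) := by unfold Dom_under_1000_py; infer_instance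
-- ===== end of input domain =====

-- B replaces A's self-recursion by a flat token-list assembly joined with spaces (alternative decomposition, same cost).

def pvOnes : List String :=
  ["", "one", "two", "three", "four", "five", "six", "seven", "eight", "nine",
   "ten", "eleven", "twelve", "thirteen", "fourteen", "fifteen", "sixteen",
   "seventeen", "eighteen", "nineteen"]

def pvTens : List String :=
  ["", "", "twenty", "thirty", "forty", "fifty", "sixty", "seventy", "eighty", "ninety"]

-- ===== PORT A =====
-- Literal transliteration of A; list indexing via pyGet? with .getD "" — the none case
-- (Python's IndexError) is excluded by Pre_under_1000_py. The recursion is totalised with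
-- fuel; the recursion depth is at most 2 (the recursive call's argument n % 100 is below
-- 100), so fuel 2 never runs out.
def under_1000_go (fuel : Nat) (n : Int) : String :=
  match fuel with
  | 0 => ""
  | fuel + 1 =>
    if n == 0 then ""
    else if n < 20 then (PySem.List.pyGet? pvOnes n).getD ""
    else if n < 100 then
      let rest := (PySem.List.pyGet? pvOnes (PySem.Int.mod n 10)).getD ""
      (PySem.List.pyGet? pvTens (PySem.Int.floordiv n 10)).getD ""
        ++ (if rest ≠ "" then " " ++ rest else "")
    else
      let rest := under_1000_go fuel (PySem.Int.mod n 100)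
      (PySem.List.pyGet? pvOnes (PySem.Int.floordiv n 100)).getD ""
        ++ " hundred" ++ (if rest ≠ "" then " " ++ rest else "")

def under_1000_py (n : Int) : String := under_1000_go 2 n

-- ===== PORT B =====
-- Literal transliteration of Source B: Source B mutates `parts` and `n` in sequence, so each
-- update step becomes a let binding of the new value of that variable.
def under_1000_py_alt (n : Int) : String :=
  if n == 0 then ""
  else if n < 20 then (PySem.List.pyGet? pvOnes n).getD ""
  else
    let parts1 : List String :=
      if n ≥ 100 then
        [(PySem.List.pyGet? pvOnes (PySem.Int.floordiv n 100)).getD "" ++ " hundred"]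
      else []
    let n1 : Int := if n ≥ 100 then PySem.Int.mod n 100 else n
    let parts2 : List String :=
      if n1 ≥ 20 then parts1 ++ [(PySem.List.pyGet? pvTens (PySem.Int.floordiv n1 10)).getD ""]
      else parts1
    let n2 : Int := if n1 ≥ 20 then PySem.Int.mod n1 10 else n1
    let parts3 : List String :=
      if n2 ≠ 0 then parts2 ++ [(PySem.List.pyGet? pvOnes n2).getD ""] else parts2
    PySem.Str.join " " parts3

-- ===== PRECONDITION & SPEC =====
-- Pre_ excludes exactly the inputs where Python A raises IndexError: n ≤ -21 (negative
-- index past the start of _ONES) and n ≥ 2000 (_ONES[n // 100] out of range).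
def Pre_under_1000_py (n : Int) : Prop := -20 ≤ n ∧ n < 2000
instance (n : Int) : Decidable (Pre_under_1000_py n) := by unfold Pre_under_1000_py; infer_instance
def pvWitness_under_1000_py : Int := (123)

def Spec_under_1000_py (n : Int) (out : String) : Prop := out = under_1000_py_alt n
instance (n : Int) (out : String) : Decidable (Spec_under_1000_py n out) := by unfold Spec_under_1000_py; infer_instance

-- ===== CLAIM (what is proved, stated in full; the proofs are below) =====
def Claim_equal_under_1000_py : Prop := ∀ (n : Int), Dom_under_1000_py n → Pre_under_1000_py n → Spec_under_1000_py n (under_1000_py n)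

-- ===== LEMMAS AND PROOFS =====

-- The token list B builds for a two-digit remainder m (0 ≤ m < 100).
def pvTail (m : Int) : List String :=
  let t : List String :=
    if 20 ≤ m then [(PySem.List.pyGet? pvTens (PySem.Int.floordiv m 10)).getD ""] else []
  let m2 : Int := if 20 ≤ m then PySem.Int.mod m 10 else m
  t ++ (if m2 ≠ 0 then [(PySem.List.pyGet? pvOnes m2).getD ""] else [])

-- Exhaustive check of the small range -20 ≤ n < 100, shifted to Nat for decide.
set_option maxRecDepth 100000 in
lemma pv_small : ∀ k : Nat, k < 120 →
    under_1000_py ((k : Int) - 20) = under_1000_py_alt ((k : Int) - 20) := by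
  decide

-- A's recursive call agrees with B's tail tokens on every two-digit remainder.
set_option maxRecDepth 100000 in
lemma pv_tail_go : ∀ m : Nat, m < 100 →
    under_1000_go 1 ((m : Int)) = PySem.Str.join " " (pvTail ((m : Int)))
      ∧ (pvTail ((m : Int)) = [] ↔ under_1000_go 1 ((m : Int)) = "") := by
  decide

lemma pv_join_cons (h : String) (tl : List String) :
    PySem.Str.join " " (h :: tl)
      = h ++ (if tl ≠ [] then " " ++ PySem.Str.join " " tl else "") := by
  cases tl with
  | nil =>
    simp [PySem.Str.join, PySem.Chars.join_singleton]
  | cons b bs =>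
    simp only [ne_eq, reduceCtorEq, not_false_iff, if_true]
    apply String.ext
    simp [PySem.Str.join, PySem.Chars.join_cons_cons]

lemma pv_go_succ (fuel : Nat) (n : Int) :
    under_1000_go (fuel + 1) n =
      (if n == 0 then ""
       else if n < 20 then (PySem.List.pyGet? pvOnes n).getD ""
       else if n < 100 then
         (PySem.List.pyGet? pvTens (PySem.Int.floordiv n 10)).getD ""
           ++ (if (PySem.List.pyGet? pvOnes (PySem.Int.mod n 10)).getD "" ≠ ""
               then " " ++ (PySem.List.pyGet? pvOnes (PySem.Int.mod n 10)).getD "" else "")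
       else
         (PySem.List.pyGet? pvOnes (PySem.Int.floordiv n 100)).getD ""
           ++ " hundred" ++ (if under_1000_go fuel (PySem.Int.mod n 100) ≠ ""
               then " " ++ under_1000_go fuel (PySem.Int.mod n 100) else "")) := rfl

lemma pv_B_hundred (n : Int) (h : 100 ≤ n) :
    under_1000_py_alt n
      = PySem.Str.join " "
          (((PySem.List.pyGet? pvOnes (PySem.Int.floordiv n 100)).getD "" ++ " hundred")
            :: pvTail (PySem.Int.mod n 100)) := by
  have h0 : ¬ n = 0 := by omega
  have h20 : ¬ n < 20 := by omega
  unfold under_1000_py_alt pvTail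
  simp only [h0, h20, beq_iff_eq, if_false, ge_iff_le, h, if_true]
  split_ifs <;> simp

lemma pv_A_hundred (n : Int) (h : 100 ≤ n) :
    under_1000_py n
      = (PySem.List.pyGet? pvOnes (PySem.Int.floordiv n 100)).getD "" ++ " hundred"
          ++ (if under_1000_go 1 (PySem.Int.mod n 100) ≠ ""
              then " " ++ under_1000_go 1 (PySem.Int.mod n 100) else "") := by
  have h0 : ¬ n = 0 := by omega
  have h20 : ¬ n < 20 := by omega
  have h100 : ¬ n < 100 := by omega
  show under_1000_go (1 + 1) n = _
  rw [pv_go_succ]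
  simp only [h0, h20, h100, beq_iff_eq, if_false]

-- ===== VERDICT (by name: the statement is the Claim_ definition above) =====
theorem under_1000_py_spec : Claim_equal_under_1000_py := by
  intro n _ hpre
  obtain ⟨h1, h2⟩ := hpre
  unfold Spec_under_1000_py
  by_cases hn : n < 100
  · have hk : ((n + 20).toNat : Int) - 20 = n := by omega
    have := pv_small (n + 20).toNat (by omega)
    rw [hk] at this
    exact this
  · have hn' : 100 ≤ n := by omega
    have hm0 : 0 ≤ PySem.Int.mod n 100 := PySem.Int.mod_nonneg n (by omega)
    have hm1 : PySem.Int.mod n 100 < 100 := PySem.Int.mod_lt n (by omega)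
    have hcast : (((PySem.Int.mod n 100).toNat : Int)) = PySem.Int.mod n 100 := by omega
    obtain ⟨hgo, hiff⟩ := pv_tail_go (PySem.Int.mod n 100).toNat (by omega)
    rw [hcast] at hgo hiff
    rw [pv_A_hundred n hn', pv_B_hundred n hn', pv_join_cons, hgo]
    congr 1
    by_cases htl : pvTail (PySem.Int.mod n 100) = []
    · have hjoin : PySem.Str.join " " (pvTail (PySem.Int.mod n 100)) = "" := by
        rw [← hgo]; exact hiff.mp htl
      rw [if_neg (fun hc => hc hjoin), if_neg (fun hc : pvTail (PySem.Int.mod n 100) ≠ [] => hc htl)]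
    · have hjoin : PySem.Str.join " " (pvTail (PySem.Int.mod n 100)) ≠ "" := by
        rw [← hgo]; exact fun hc => htl (hiff.mpr hc)
      rw [if_pos hjoin, if_pos htl]
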